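-- pv_equiv track=rewrite | github.com/saren071/cthreadingpi | benchmarks/concurrency_test.py | uneven_work
-- ===== SOURCE A (Python) =====
-- def uneven_work(n: int) -> int:
--     total = 0
--     for i in range(n):
--         total += i
--
--         if i % 10000 == 0:
--             for _ in range(20000):
--                 total += i ^ _
--     return total
-- ===== SOURCE B (Python) =====
-- def xor_range_sum(m: int, L: int) -> int:
--     # sum of (m ^ j) for j in range(L), computed in O(log L)
--     if L == 0:
--         return 0
--     if L % 2 == 1:
--         return xor_range_sum(m, L - 1) + (m ^ (L - 1))
--     # pair j = 2t, 2t+1: (m^2t) + (m^(2t+1)) = 4*((m//2)^t) + 1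
--     return 4 * xor_range_sum(m // 2, L // 2) + L // 2
--
-- def uneven_work(n: int) -> int:
--     if n <= 0:
--         return 0
--     total = n * (n - 1) // 2
--     m = 0
--     while m < n:
--         total += xor_range_sum(m, 20000)
--         m += 10000
--     return total
-- ===== Notes on version B (the rewrite author's own statement) =====
-- stated objective: faster
-- what changed: Replaces the O(n) accumulation loop by the closed-form triangular sum plus, for each multiple of 10000 below n, an O(log) recursive bit-pairing evaluation of the 20000-term XOR range sum.
import Mathlib
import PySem

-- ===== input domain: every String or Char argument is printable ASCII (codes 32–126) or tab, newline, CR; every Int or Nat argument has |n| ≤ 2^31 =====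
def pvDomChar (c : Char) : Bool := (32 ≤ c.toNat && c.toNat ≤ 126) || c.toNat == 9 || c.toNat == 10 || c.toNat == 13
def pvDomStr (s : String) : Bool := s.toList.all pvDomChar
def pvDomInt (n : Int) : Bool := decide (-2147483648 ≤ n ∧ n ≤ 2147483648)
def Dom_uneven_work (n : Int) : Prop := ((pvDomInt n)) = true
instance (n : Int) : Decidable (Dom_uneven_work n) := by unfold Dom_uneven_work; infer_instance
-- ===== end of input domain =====

-- B replaces the O(n) loop by the closed-form triangular sum plus an O(log)
-- recursive bit-pairing XOR-range sum per multiple of 10000 (objective: faster).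

-- ===== PORT A =====
def uneven_work (n : Int) : Int :=
  (PySem.List.pyRange 0 n 1).foldl
    (fun total i =>
      let total := total + i
      if PySem.Int.mod i 10000 = 0 then
        (PySem.List.pyRange 0 20000 1).foldl (fun t j => t + PySem.Int.bxor i j) total
      else total) 0

-- ===== PORT B =====
-- sum of (m ^ j) for j in range(L), computed in O(log L)  (Source B's xor_range_sum)
def xorRangeSum (m : Int) (L : Nat) : Int :=
  if _h0 : L = 0 then 0
  else if L % 2 = 1 then xorRangeSum m (L - 1) + PySem.Int.bxor m ((L : Int) - 1)
  else 4 * xorRangeSum (PySem.Int.floordiv m 2) (L / 2) + ((L : Int) / 2)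
termination_by L
decreasing_by all_goals omega

-- Source B's while-loop: m starts at 0, steps by 10000 while m < n
def uwLoop (n m total : Int) : Int :=
  if m < n then uwLoop n (m + 10000) (total + xorRangeSum m 20000) else total
termination_by (n - m).toNat
decreasing_by omega

def uneven_work_alt (n : Int) : Int :=
  if n ≤ 0 then 0
  else uwLoop n 0 (PySem.Int.floordiv (n * (n - 1)) 2)

-- ===== PRECONDITION & SPEC =====
def Spec_uneven_work (n : Int) (out : Int) : Prop := out = uneven_work_alt n
instance (n : Int) (out : Int) : Decidable (Spec_uneven_work n out) := by unfold Spec_uneven_work; infer_instance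

-- ===== CLAIM (what is proved, stated in full; the proofs are below) =====
def Claim_equal_uneven_work : Prop := ∀ (n : Int), Dom_uneven_work n → Spec_uneven_work n (uneven_work n)

-- ===== LEMMAS AND PROOFS =====

-- reference value of the inner 20000-term XOR sum (and its prefixes)
def sfold (m : Int) (L : Nat) : Int :=
  ((List.range L).map (fun (j : Nat) => PySem.Int.bxor m (j : Int))).sum

-- reference recurrence for A's whole loop
def refT : Nat → Int
  | 0 => 0
  | k + 1 =>
      refT k + k +
        (if PySem.Int.mod (k : Int) 10000 = 0 then sfold (k : Int) 20000 else 0)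

-- number of multiples of 10000 in [0, N)
def numMult (N : Nat) : Nat := (N + 9999) / 10000

-- multiples part of the total
def gsum (N : Nat) : Int :=
  ((List.range (numMult N)).map (fun (t : Nat) => sfold ((10000 * t : Nat) : Int) 20000)).sum

-- triangular part
def tri (N : Nat) : Int := ((List.range N).map (fun (k : Nat) => (k : Int))).sum

-- ---- Nat-level xor pairing ----

lemma nat_xor_two_mul (c t : Nat) : (2*c) ^^^ (2*t) = 2*(c ^^^ t) := by
  have := Nat.bitwise_bit (f := bne) (a := false) (m := c) (b := false) (n := t)
  simpa [Nat.bit, Nat.xor, two_mul] using this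

lemma nat_xor_two_mul_add_one (c t : Nat) : (2*c) ^^^ (2*t+1) = 2*(c ^^^ t) + 1 := by
  have := Nat.bitwise_bit (f := bne) (a := false) (m := c) (b := true) (n := t)
  simpa [Nat.bit, Nat.xor, two_mul] using this

lemma nat_xor_odd_even (c t : Nat) : (2*c+1) ^^^ (2*t) = 2*(c ^^^ t) + 1 := by
  have := Nat.bitwise_bit (f := bne) (a := true) (m := c) (b := false) (n := t)
  simpa [Nat.bit, Nat.xor, two_mul] using this

lemma nat_xor_odd_odd (c t : Nat) : (2*c+1) ^^^ (2*t+1) = 2*(c ^^^ t) := by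
  have := Nat.bitwise_bit (f := bne) (a := true) (m := c) (b := true) (n := t)
  simpa [Nat.bit, Nat.xor, two_mul] using this

lemma nat_xor_pair (a t : Nat) :
    (a ^^^ (2*t)) + (a ^^^ (2*t+1)) = 4 * (a/2 ^^^ t) + 1 := by
  obtain ⟨c, hc | hc⟩ : ∃ c, a = 2*c ∨ a = 2*c+1 := ⟨a/2, by omega⟩
  · subst hc
    have h2 : 2*c/2 = c := by omega
    rw [h2, nat_xor_two_mul, nat_xor_two_mul_add_one]
    omega
  · subst hc
    have h2 : (2*c+1)/2 = c := by omega
    rw [h2, nat_xor_odd_even, nat_xor_odd_odd]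
    omega

-- Int-level pairing for the bxor primitive, m ≥ 0
lemma bxor_pair (m : Int) (hm : 0 ≤ m) (t : Nat) :
    PySem.Int.bxor m (2*(t:Int)) + PySem.Int.bxor m (2*(t:Int)+1) =
      4 * PySem.Int.bxor (PySem.Int.floordiv m 2) (t : Int) + 1 := by
  obtain ⟨a, rfl⟩ := Int.eq_ofNat_of_zero_le hm
  have h2 : ((2*t : Nat) : Int) = 2*(t:Int) := by push_cast; ring
  have h3 : ((2*t+1 : Nat) : Int) = 2*(t:Int)+1 := by push_cast; ring
  have hfd : PySem.Int.floordiv (a : Int) 2 = ((a / 2 : Nat) : Int) := by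
    exact_mod_cast PySem.Int.floordiv_natCast a 2
  rw [← h3, ← h2, hfd, PySem.Int.bxor_natCast, PySem.Int.bxor_natCast, PySem.Int.bxor_natCast]
  exact_mod_cast nat_xor_pair a t

-- ---- sfold basics ----

lemma sfold_succ (m : Int) (L : Nat) :
    sfold m (L+1) = sfold m L + PySem.Int.bxor m (L : Int) := by
  simp [sfold, List.range_succ]

lemma sfold_pairs (m : Int) (k : Nat) :
    sfold m (2*k) =
      ((List.range k).map (fun (t : Nat) =>
        PySem.Int.bxor m (2*(t:Int)) + PySem.Int.bxor m (2*(t:Int)+1))).sum := by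
  induction k with
  | zero => simp [sfold]
  | succ k ih =>
      have h : 2*(k+1) = (2*k) + 1 + 1 := by omega
      rw [h, sfold_succ, sfold_succ, ih, List.range_succ]
      simp only [List.map_append, List.sum_append, List.map_cons, List.map_nil,
        List.sum_cons, List.sum_nil]
      push_cast
      ring

lemma sum_four_add_one (B : Nat → Int) (k : Nat) :
    ((List.range k).map (fun t => 4 * B t + 1)).sum
      = 4 * ((List.range k).map B).sum + k := by
  induction k with
  | zero => simp
  | succ k ih =>
      rw [List.range_succ]
      simp only [List.map_append, List.sum_append, List.map_cons, List.map_nil,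
        List.sum_cons, List.sum_nil]
      rw [ih]
      push_cast
      ring

lemma sfold_even (m : Int) (hm : 0 ≤ m) (k : Nat) :
    sfold m (2*k) = 4 * sfold (PySem.Int.floordiv m 2) k + k := by
  rw [sfold_pairs]
  have hcong : ((List.range k).map (fun (t : Nat) =>
        PySem.Int.bxor m (2*(t:Int)) + PySem.Int.bxor m (2*(t:Int)+1)))
      = ((List.range k).map (fun (t : Nat) =>
        4 * PySem.Int.bxor (PySem.Int.floordiv m 2) (t : Int) + 1)) := by
    apply List.map_congr_left
    intro t _
    exact bxor_pair m hm t
  rw [hcong, sum_four_add_one (fun (t : Nat) => PySem.Int.bxor (PySem.Int.floordiv m 2) (t : Int)) k]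
  rfl

-- ---- xorRangeSum computes sfold ----

lemma floordiv_two_nonneg (m : Int) (hm : 0 ≤ m) : 0 ≤ PySem.Int.floordiv m 2 := by
  obtain ⟨a, rfl⟩ := Int.eq_ofNat_of_zero_le hm
  have h : PySem.Int.floordiv (a : Int) 2 = ((a / 2 : Nat) : Int) := by
    exact_mod_cast PySem.Int.floordiv_natCast a 2
  rw [h]; positivity

lemma xorRangeSum_eq (L : Nat) : ∀ (m : Int), 0 ≤ m → xorRangeSum m L = sfold m L := by
  induction L using Nat.strong_induction_on with
  | _ L ih =>
    intro m hm
    rcases Nat.eq_zero_or_pos L with h0 | hpos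
    · subst h0; simp [xorRangeSum, sfold]
    · rw [xorRangeSum, dif_neg (by omega : ¬ L = 0)]
      by_cases hodd : L % 2 = 1
      · rw [if_pos hodd]
        obtain ⟨K, rfl⟩ : ∃ K, L = K + 1 := ⟨L - 1, by omega⟩
        have hK1 : K + 1 - 1 = K := by omega
        rw [hK1, ih K (by omega) m hm, sfold_succ]
        congr 1
        push_cast; ring
      · rw [if_neg hodd]
        obtain ⟨k, rfl⟩ : ∃ k, L = 2 * k := ⟨L / 2, by omega⟩
        have h2 : 2 * k / 2 = k := by omega
        rw [h2, ih k (by omega) _ (floordiv_two_nonneg m hm), sfold_even m hm k]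
        push_cast
        omega

-- ---- A's fold equals refT ----

lemma inner_fold (i : Int) (B : Nat) (total : Int) :
    (PySem.List.pyRange 0 (B:Int) 1).foldl (fun t j => t + PySem.Int.bxor i j) total
      = total + sfold i B := by
  induction B generalizing total with
  | zero =>
      rw [show ((0:Nat):Int) = 0 from by norm_num, PySem.List.pyRange_one_eq_nil le_rfl]
      simp [sfold]
  | succ B ih =>
      rw [show ((B+1:Nat):Int) = (B:Int)+1 from by push_cast; ring,
        PySem.List.pyRange_one_succ_right (by positivity), List.foldl_append, ih, sfold_succ]
      simp only [List.foldl_cons, List.foldl_nil]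
      ring

lemma uneven_work_natCast (N : Nat) : uneven_work (N : Int) = refT N := by
  induction N with
  | zero =>
      have h0 : ((0:Nat):Int) = 0 := by norm_num
      rw [h0]
      unfold uneven_work
      rw [PySem.List.pyRange_one_eq_nil le_rfl]
      rfl
  | succ N ih =>
      unfold uneven_work
      have hsplit : PySem.List.pyRange 0 ((N+1 : Nat) : Int) 1
          = PySem.List.pyRange 0 (N : Int) 1 ++ [(N : Int)] := by
        have : ((N+1 : Nat) : Int) = (N : Int) + 1 := by push_cast; ring
        rw [this, PySem.List.pyRange_one_succ_right (by positivity)]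
      rw [hsplit, List.foldl_append]
      unfold uneven_work at ih
      rw [ih, refT]
      simp only [List.foldl_cons, List.foldl_nil]
      by_cases hmod : PySem.Int.mod (N : Int) 10000 = 0
      · rw [if_pos hmod, if_pos hmod]
        have hi := inner_fold (N : Int) 20000 (refT N + (N : Int))
        rw [show ((20000:Nat):Int) = (20000:Int) from by norm_num] at hi
        rw [hi]
      · rw [if_neg hmod, if_neg hmod, add_zero]

-- ---- refT closed form ----

lemma mod_cond_iff (N : Nat) : PySem.Int.mod (N : Int) 10000 = 0 ↔ N % 10000 = 0 := by
  have key : PySem.Int.mod (N : Int) 10000 = ((N % 10000 : Nat) : Int) := by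
    have h1 : ((10000:Nat):Int) = (10000:Int) := by norm_num
    rw [← h1]
    exact PySem.Int.mod_natCast N 10000
  rw [key]
  exact ⟨fun h => by exact_mod_cast h, fun h => by exact_mod_cast h⟩

lemma gsum_succ (N : Nat) :
    gsum (N+1) = gsum N +
      (if PySem.Int.mod (N : Int) 10000 = 0 then sfold (N : Int) 20000 else 0) := by
  unfold gsum
  by_cases h : N % 10000 = 0
  · have hq : numMult (N+1) = numMult N + 1 := by unfold numMult; omega
    have hmul : 10000 * numMult N = N := by unfold numMult; omega
    rw [hq, List.range_succ, List.map_append, List.sum_append]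
    rw [if_pos ((mod_cond_iff N).mpr h)]
    rw [List.map_singleton, List.sum_singleton]
    rw [show ((10000 * numMult N : Nat) : Int) = ((N : Nat) : Int) from by exact_mod_cast hmul]
  · have hq : numMult (N+1) = numMult N := by unfold numMult; omega
    rw [hq, if_neg (fun hc => h ((mod_cond_iff N).mp hc)), add_zero]

lemma refT_closed (N : Nat) : refT N = tri N + gsum N := by
  induction N with
  | zero => simp [refT, tri, gsum, numMult]
  | succ N ih =>
      rw [refT, ih, gsum_succ]
      have : tri (N+1) = tri N + N := by simp [tri, List.range_succ]
      rw [this]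
      ring

-- ---- B's loop ----

lemma tri_eq (N : Nat) : 2 * tri N = (N : Int) * ((N : Int) - 1) := by
  induction N with
  | zero => simp [tri]
  | succ N ih =>
      have : tri (N+1) = tri N + N := by simp [tri, List.range_succ]
      rw [this]
      push_cast
      push_cast at ih
      linarith

lemma uwLoop_eq (n : Int) (hn : 0 < n) :
    ∀ (d t : Nat) (acc : Int), d = numMult n.toNat - t →
      uwLoop n (10000 * (t : Int)) acc =
        acc + ((List.range' t d).map (fun (s : Nat) => xorRangeSum (10000 * (s : Int)) 20000)).sum := by
  intro d
  induction d with
  | zero =>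
      intro t acc hd
      have hge : ¬ (10000 * (t : Int) < n) := by
        have : numMult n.toNat ≤ t := by omega
        unfold numMult at this
        have hN : (n.toNat : Int) = n := Int.toNat_of_nonneg (le_of_lt hn)
        have : n.toNat ≤ 10000 * t := by omega
        have := (Int.ofNat_le).mpr this
        push_cast at this
        omega
      rw [uwLoop, if_neg hge]
      simp
  | succ d ih =>
      intro t acc hd
      have hlt : 10000 * (t : Int) < n := by
        have ht : t < numMult n.toNat := by omega
        unfold numMult at ht
        have hN : (n.toNat : Int) = n := Int.toNat_of_nonneg (le_of_lt hn)
        have : 10000 * t < n.toNat := by omega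
        have := (Int.ofNat_lt).mpr this
        push_cast at this
        omega
      rw [uwLoop, if_pos hlt]
      have hstep : 10000 * (t : Int) + 10000 = 10000 * ((t+1 : Nat) : Int) := by
        push_cast; ring
      rw [hstep, ih (t+1) _ (by omega)]
      rw [List.range'_succ]
      simp only [List.map_cons, List.sum_cons]
      ring

lemma gsum_as_xrs (n : Int) :
    ((List.range' 0 (numMult n.toNat)).map
        (fun (s : Nat) => xorRangeSum (10000 * (s : Int)) 20000)).sum = gsum n.toNat := by
  rw [show List.range' 0 (numMult n.toNat) = List.range (numMult n.toNat) from
    (List.range_eq_range').symm]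
  unfold gsum
  refine congrArg List.sum ?_
  apply List.map_congr_left
  intro t _
  rw [xorRangeSum_eq 20000 (10000 * (t : Int)) (by positivity)]
  refine congrArg (fun z => sfold z 20000) ?_
  push_cast; ring

-- ===== VERDICT (by name: the statement is the Claim_ definition above) =====
theorem uneven_work_spec : Claim_equal_uneven_work := by
  intro n _
  unfold Spec_uneven_work uneven_work_alt
  by_cases hn : n ≤ 0
  · rw [if_pos hn]
    unfold uneven_work
    rw [PySem.List.pyRange_one_eq_nil hn]
    rfl
  · rw [Int.not_le] at hn
    rw [if_neg (not_le.mpr hn)]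
    have hN : ((n.toNat : Nat) : Int) = n := Int.toNat_of_nonneg (le_of_lt hn)
    have hA : uneven_work n = refT n.toNat := by
      rw [← hN]; exact uneven_work_natCast n.toNat
    have hB := uwLoop_eq n hn (numMult n.toNat) 0 (PySem.Int.floordiv (n * (n - 1)) 2) (by omega)
    simp only [Nat.cast_zero, mul_zero] at hB
    rw [hB, gsum_as_xrs n]
    have htri : PySem.Int.floordiv (n * (n - 1)) 2 = tri n.toNat := by
      have h2 := tri_eq n.toNat
      rw [hN] at h2
      have hpos : (0:Int) < 2 := by norm_num
      rw [PySem.Int.floordiv_eq_ediv_of_pos hpos]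
      omega
    rw [hA, refT_closed, htri]
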